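-- pv_equiv track=rewrite | github.com/kashapov17/is-ip | work1/hillpher.py | keyCompletion
-- ===== SOURCE A (Python) =====
-- import string
--
-- alph = (string.digits + string.ascii_letters + string.punctuation + " ").replace("$", "").replace("&", "")
--
-- keyPower = 32 #max key lengh = 2^32 = about 4 billion
--
-- def keyCompletion(key):
--     for i in range(1, keyPower):
--         keyLenght = len(key)
--         if keyLenght <= i**2:
--             offset = alph.find('a')
--             for j in range(offset, i**2 - keyLenght + offset):
--                 key += alph[j]
--             break
--     return key
-- ===== SOURCE B (Python) =====
-- import string
--
-- alph = (string.digits + string.ascii_letters + string.punctuation + " ").replace("$", "").replace("&", "")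
--
--
-- def _isqrt(n):
--     # floor square root by Newton's iteration (this module may not import math)
--     if n <= 1:
--         return n
--     guess = 1 << ((n.bit_length() - 1) // 2 + 1)
--     while True:
--         nxt = (guess + n // guess) // 2
--         if nxt < guess:
--             guess = nxt
--         else:
--             return guess
--
--
-- def keyCompletion(key):
--     n = len(key)
--     root = _isqrt(n)
--     i = root if root * root == n else root + 1
--     if i < 1:
--         i = 1
--     if i > 31:
--         return key
--     offset = alph.find('a')
--     return key + alph[offset: offset + i * i - n]
-- ===== Notes on version B (the rewrite author's own statement) =====
-- stated objective: alternative
-- what changed: A's linear search over range(1,32) for the smallest i with len(key) <= i*i and its character-by-character append loop are replaced by a direct ceiling-integer-square-root computation (Newton's iteration) and a single alphabet slice.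
import Mathlib
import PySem

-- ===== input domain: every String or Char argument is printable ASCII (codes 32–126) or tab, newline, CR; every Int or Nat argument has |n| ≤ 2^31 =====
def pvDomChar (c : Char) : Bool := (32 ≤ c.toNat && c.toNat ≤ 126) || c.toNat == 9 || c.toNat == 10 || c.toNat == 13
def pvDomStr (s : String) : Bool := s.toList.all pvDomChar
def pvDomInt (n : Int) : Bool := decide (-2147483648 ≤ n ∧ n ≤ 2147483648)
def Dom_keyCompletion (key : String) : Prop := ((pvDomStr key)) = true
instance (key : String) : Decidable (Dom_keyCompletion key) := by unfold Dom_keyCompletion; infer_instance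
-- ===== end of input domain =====

-- B replaces A's linear search through range(1,32) and its character-by-character inner
-- append loop with a Newton-iteration integer square root and a single alphabet slice.

-- ===== PORT A =====

-- module constant alph (digits + letters + punctuation + " ", with '$' and '&' removed)
def pvAlph : String := "0123456789abcdefghijklmnopqrstuvwxyzABCDEFGHIJKLMNOPQRSTUVWXYZ!\"#%'()*+,-./:;<=>?@[\\]^_`{|}~ "

-- inner loop 'for j in range(offset, i**2 - keyLenght + offset): key += alph[j]'
-- (alph[j] is in range on every iteration A actually executes, so the .getD default is never used)
def kcInner (key : String) (js : List Int) : String :=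
  js.foldl (fun k j => k.push ((PySem.Str.pyGet? pvAlph j).getD 'a')) key

-- outer loop 'for i in range(1, keyPower): …'; the break returns from the recursion
def kcOuter (key : String) : List Int → String
  | [] => key
  | i :: is =>
    let keyLenght : Int := PySem.Str.len key
    if keyLenght ≤ i ^ 2 then
      let offset : Int := PySem.Str.find pvAlph "a"
      kcInner key (PySem.List.pyRange offset (i ^ 2 - keyLenght + offset) 1)
    else kcOuter key is

def keyCompletion (key : String) : String := kcOuter key (PySem.List.pyRange 1 32 1)

-- ===== PORT B =====

-- n.bit_length() for n ≥ 0
def pyBitLength (n : Nat) : Nat := if n = 0 then 0 else Nat.log2 n + 1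

-- the 'while True' Newton loop of _isqrt (guess strictly decreases)
def isqrtIter (n guess : Nat) : Nat :=
  let nxt := (guess + n / guess) / 2
  if _h : nxt < guess then isqrtIter n nxt else guess
termination_by guess

-- _isqrt; only ever called on len(key) ≥ 0, so Nat is exact here
def pyIsqrt (n : Nat) : Nat :=
  if n ≤ 1 then n else isqrtIter n (1 <<< ((pyBitLength n - 1) / 2 + 1))

def keyCompletion_alt (key : String) : String :=
  let n : Int := PySem.Str.len key
  let root : Int := (pyIsqrt n.toNat : Int)
  let i : Int := if root * root = n then root else root + 1
  let i : Int := if i < 1 then 1 else i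
  if 31 < i then key
  else
    let offset : Int := PySem.Str.find pvAlph "a"
    key ++ PySem.Str.slice pvAlph (some offset) (some (offset + i * i - n))

-- ===== PRECONDITION & SPEC =====
def Spec_keyCompletion (key : String) (out : String) : Prop := out = keyCompletion_alt key
instance (key : String) (out : String) : Decidable (Spec_keyCompletion key out) := by unfold Spec_keyCompletion; infer_instance

-- ===== CLAIM (what is proved, stated in full; the proofs are below) =====
def Claim_equal_keyCompletion : Prop := ∀ (key : String), Dom_keyCompletion key → Spec_keyCompletion key (keyCompletion key)

-- ===== LEMMAS AND PROOFS =====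

-- the padding each side appends, as a function of the key length only
def padInner (n : Nat) (i : Int) : List Char :=
  (PySem.List.pyRange 10 (i ^ 2 - (n : Int) + 10) 1).map
    (fun j => (PySem.List.pyGet? pvAlph.toList j).getD 'a')

def padAux (n : Nat) : List Int → List Char
  | [] => []
  | i :: is => if (n : Int) ≤ i ^ 2 then padInner n i else padAux n is

def iB (n : Nat) : Int :=
  let root : Int := (pyIsqrt n : Int)
  let i : Int := if root * root = (n : Int) then root else root + 1
  if i < 1 then 1 else i

def padB (n : Nat) : List Char :=
  if 31 < iB n then []
  else PySem.List.slice pvAlph.toList (some 10) (some (10 + iB n * iB n - (n : Int)))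

lemma find_alph_a : PySem.Str.find pvAlph "a" = 10 := by decide

lemma alph_len : pvAlph.toList.length = 93 := by decide

lemma range_lit : PySem.List.pyRange 1 32 1 =
    [1,2,3,4,5,6,7,8,9,10,11,12,13,14,15,16,17,18,19,20,21,22,23,24,25,26,27,28,29,30,31] := by
  decide

lemma kcInner_toList (js : List Int) : ∀ key : String,
    (kcInner key js).toList
      = key.toList ++ js.map (fun j => (PySem.List.pyGet? pvAlph.toList j).getD 'a') := by
  induction js with
  | nil => intro key; simp [kcInner]
  | cons j js ih =>
      intro key
      simp only [kcInner, List.foldl_cons, List.map_cons] at *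
      rw [ih]
      simp [PySem.Str.pyGet?_eq]

lemma kcOuter_toList (is : List Int) (key : String) :
    (kcOuter key is).toList = key.toList ++ padAux key.toList.length is := by
  induction is with
  | nil => simp [kcOuter, padAux]
  | cons i is ih =>
      simp only [kcOuter, padAux, PySem.Str.len_eq, find_alph_a]
      split_ifs with h
      · rw [kcInner_toList]
        simp [padInner]
      · exact ih

lemma keyCompletion_toList (key : String) :
    (keyCompletion key).toList
      = key.toList ++ padAux key.toList.length (PySem.List.pyRange 1 32 1) := by
  exact kcOuter_toList (PySem.List.pyRange 1 32 1) key

lemma alt_toList (key : String) :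
    (keyCompletion_alt key).toList = key.toList ++ padB key.toList.length := by
  simp only [keyCompletion_alt, padB, iB, PySem.Str.len_eq, find_alph_a, Int.toNat_natCast]
  split_ifs <;> simp [PySem.Str.toList_slice]

-- Newton's isqrt is Nat.sqrt
lemma isqrtIter_eq (n : Nat) (guess : Nat) : isqrtIter n guess = Nat.sqrt.iter n guess := by
  induction guess using Nat.strong_induction_on with
  | _ guess ih =>
      rw [isqrtIter, Nat.sqrt.iter]
      by_cases h : (guess + n / guess) / 2 < guess
      · simp only [h, dif_pos]
        exact ih _ h
      · simp only [h, dif_neg, not_false_iff]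

lemma pyIsqrt_eq (n : Nat) : pyIsqrt n = Nat.sqrt n := by
  rw [pyIsqrt, Nat.sqrt]
  by_cases h : n ≤ 1
  · simp [h]
  · have h0 : n ≠ 0 := by omega
    rw [if_neg h, if_neg h, isqrtIter_eq]
    have hbl : pyBitLength n - 1 = Nat.log2 n := by simp [pyBitLength, h0]
    rw [hbl]

-- characterisation of B's padding exponent
lemma iB_eq (n : Nat) (k : Nat) (hk1 : 1 ≤ k) (hhi : n ≤ k * k)
    (hlo : (k - 1) * (k - 1) < n ∨ k = 1 ∧ n = 0) : iB n = (k : Int) := by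
  simp only [iB, pyIsqrt_eq]
  rcases hlo with hlo | ⟨hk, hn⟩
  · by_cases he : n = k * k
    · have hs : Nat.sqrt n = k := by rw [he, Nat.sqrt_eq]
      rw [hs]
      have hc : ((k : Int)) * (k : Int) = (n : Int) := by exact_mod_cast congrArg (Nat.cast (R := Int)) he.symm
      rw [if_pos hc, if_neg (by omega)]
    · have hs2 : Nat.sqrt n < k := Nat.sqrt_lt.mpr (lt_of_le_of_ne hhi he)
      have hs1 : k - 1 ≤ Nat.sqrt n := Nat.le_sqrt.mpr (le_of_lt hlo)
      have hs : Nat.sqrt n = k - 1 := by omega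
      rw [hs]
      have hne : ¬ (((k - 1 : Nat) : Int) * ((k - 1 : Nat) : Int) = (n : Int)) := by
        intro hcontra
        have : (k - 1) * (k - 1) = n := by exact_mod_cast hcontra
        omega
      rw [if_neg hne, if_neg (by omega)]
      omega
  · subst hk; subst hn
    norm_num [Nat.sqrt]

lemma iB_big (n : Nat) (h : 961 < n) : 31 < iB n := by
  have h31 : 31 ≤ Nat.sqrt n := Nat.le_sqrt.mpr (by omega)
  simp only [iB, pyIsqrt_eq]
  split_ifs with hc hl hl
  · omega
  · have hs32 : 32 ≤ Nat.sqrt n := by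
      rcases Nat.lt_or_ge (Nat.sqrt n) 32 with hlt | hge
      · have hs : Nat.sqrt n = 31 := by omega
        rw [hs] at hc; norm_num at hc; omega
      · exact hge
    omega
  · omega
  · omega

lemma padB_big (n : Nat) (h : 961 < n) : padB n = [] := by
  unfold padB
  rw [if_pos (iB_big n h)]

-- the inner-loop characters are a slice of alph
lemma map_range_take (p : Nat) (hp : p ≤ 83) :
    (PySem.List.pyRange 10 ((p : Int) + 10) 1).map
        (fun j => (PySem.List.pyGet? pvAlph.toList j).getD 'a')
      = (pvAlph.toList.drop 10).take p := by
  induction p with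
  | zero => decide
  | succ p ih =>
      have hsr := PySem.List.pyRange_one_succ_right (a := 10) (b := (p : Int) + 10) (by omega)
      rw [show ((p + 1 : Nat) : Int) + 10 = ((p : Int) + 10) + 1 by push_cast; ring, hsr]
      rw [List.map_append, ih (by omega)]
      have hidx : 10 + p < pvAlph.toList.length := by rw [alph_len]; omega
      have hget : PySem.List.pyGet? pvAlph.toList ((p : Int) + 10) = some pvAlph.toList[10 + p] := by
        rw [show (p : Int) + 10 = ((10 + p : Nat) : Int) by push_cast; ring]
        rw [PySem.List.pyGet?_natCast]
        exact List.getElem?_eq_getElem hidx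
      rw [List.take_add_one]
      simp [hget, List.getElem?_drop, List.getElem?_eq_getElem hidx]

-- one bracket: when k is the first exponent with n ≤ k², A's pad equals B's pad
lemma step (n : Nat) (k : Nat) (hk1 : 1 ≤ k) (hk31 : k ≤ 31)
    (hhi : n ≤ k * k) (hlo : (k - 1) * (k - 1) < n ∨ k = 1 ∧ n = 0) :
    padInner n (k : Int) = padB n := by
  have hib : iB n = (k : Int) := iB_eq n k hk1 hhi hlo
  have hkk : ((k : Int)) * (k : Int) = ((k * k : Nat) : Int) := by push_cast; ring
  have hp : k * k - n ≤ 83 := by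
    rcases hlo with hlo | ⟨hk, hn⟩
    · obtain ⟨m, rfl⟩ : ∃ m, k = m + 1 := ⟨k - 1, by omega⟩
      simp only [Nat.add_sub_cancel] at hlo
      have hle : (m + 1) * (m + 1) ≤ n + 83 := by nlinarith
      omega
    · subst hk; subst hn; norm_num
  unfold padB
  rw [hib, if_neg (by omega), hkk]
  have harg : ((k : Int)) ^ 2 - (n : Int) + 10 = ((k * k - n : Nat) : Int) + 10 := by
    rw [sq, hkk]; omega
  unfold padInner
  rw [harg, map_range_take _ hp]
  have hb : (10 : Int) + ((k * k : Nat) : Int) - (n : Int) = (((10 + (k * k - n)) : Nat) : Int) := by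
    omega
  rw [hb, show (10 : Int) = ((10 : Nat) : Int) from rfl]
  rw [PySem.List.slice_natCast]
  congr 1
  omega

-- all brackets together
set_option maxHeartbeats 2000000 in
lemma pad_eq (n : Nat) : padAux n (PySem.List.pyRange 1 32 1) = padB n := by
  rw [range_lit]
  simp only [padAux]
  norm_num
  by_cases h1 : n ≤ 1
  · rw [if_pos h1]
    exact_mod_cast step n 1 (by norm_num) (by norm_num) (by omega) (by omega)
  rw [if_neg h1]
  by_cases h2 : n ≤ 4
  · rw [if_pos h2]
    exact_mod_cast step n 2 (by norm_num) (by norm_num) (by omega) (by omega)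
  rw [if_neg h2]
  by_cases h3 : n ≤ 9
  · rw [if_pos h3]
    exact_mod_cast step n 3 (by norm_num) (by norm_num) (by omega) (by omega)
  rw [if_neg h3]
  by_cases h4 : n ≤ 16
  · rw [if_pos h4]
    exact_mod_cast step n 4 (by norm_num) (by norm_num) (by omega) (by omega)
  rw [if_neg h4]
  by_cases h5 : n ≤ 25
  · rw [if_pos h5]
    exact_mod_cast step n 5 (by norm_num) (by norm_num) (by omega) (by omega)
  rw [if_neg h5]
  by_cases h6 : n ≤ 36
  · rw [if_pos h6]
    exact_mod_cast step n 6 (by norm_num) (by norm_num) (by omega) (by omega)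
  rw [if_neg h6]
  by_cases h7 : n ≤ 49
  · rw [if_pos h7]
    exact_mod_cast step n 7 (by norm_num) (by norm_num) (by omega) (by omega)
  rw [if_neg h7]
  by_cases h8 : n ≤ 64
  · rw [if_pos h8]
    exact_mod_cast step n 8 (by norm_num) (by norm_num) (by omega) (by omega)
  rw [if_neg h8]
  by_cases h9 : n ≤ 81
  · rw [if_pos h9]
    exact_mod_cast step n 9 (by norm_num) (by norm_num) (by omega) (by omega)
  rw [if_neg h9]
  by_cases h10 : n ≤ 100
  · rw [if_pos h10]
    exact_mod_cast step n 10 (by norm_num) (by norm_num) (by omega) (by omega)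
  rw [if_neg h10]
  by_cases h11 : n ≤ 121
  · rw [if_pos h11]
    exact_mod_cast step n 11 (by norm_num) (by norm_num) (by omega) (by omega)
  rw [if_neg h11]
  by_cases h12 : n ≤ 144
  · rw [if_pos h12]
    exact_mod_cast step n 12 (by norm_num) (by norm_num) (by omega) (by omega)
  rw [if_neg h12]
  by_cases h13 : n ≤ 169
  · rw [if_pos h13]
    exact_mod_cast step n 13 (by norm_num) (by norm_num) (by omega) (by omega)
  rw [if_neg h13]
  by_cases h14 : n ≤ 196
  · rw [if_pos h14]
    exact_mod_cast step n 14 (by norm_num) (by norm_num) (by omega) (by omega)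
  rw [if_neg h14]
  by_cases h15 : n ≤ 225
  · rw [if_pos h15]
    exact_mod_cast step n 15 (by norm_num) (by norm_num) (by omega) (by omega)
  rw [if_neg h15]
  by_cases h16 : n ≤ 256
  · rw [if_pos h16]
    exact_mod_cast step n 16 (by norm_num) (by norm_num) (by omega) (by omega)
  rw [if_neg h16]
  by_cases h17 : n ≤ 289
  · rw [if_pos h17]
    exact_mod_cast step n 17 (by norm_num) (by norm_num) (by omega) (by omega)
  rw [if_neg h17]
  by_cases h18 : n ≤ 324
  · rw [if_pos h18]
    exact_mod_cast step n 18 (by norm_num) (by norm_num) (by omega) (by omega)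
  rw [if_neg h18]
  by_cases h19 : n ≤ 361
  · rw [if_pos h19]
    exact_mod_cast step n 19 (by norm_num) (by norm_num) (by omega) (by omega)
  rw [if_neg h19]
  by_cases h20 : n ≤ 400
  · rw [if_pos h20]
    exact_mod_cast step n 20 (by norm_num) (by norm_num) (by omega) (by omega)
  rw [if_neg h20]
  by_cases h21 : n ≤ 441
  · rw [if_pos h21]
    exact_mod_cast step n 21 (by norm_num) (by norm_num) (by omega) (by omega)
  rw [if_neg h21]
  by_cases h22 : n ≤ 484
  · rw [if_pos h22]
    exact_mod_cast step n 22 (by norm_num) (by norm_num) (by omega) (by omega)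
  rw [if_neg h22]
  by_cases h23 : n ≤ 529
  · rw [if_pos h23]
    exact_mod_cast step n 23 (by norm_num) (by norm_num) (by omega) (by omega)
  rw [if_neg h23]
  by_cases h24 : n ≤ 576
  · rw [if_pos h24]
    exact_mod_cast step n 24 (by norm_num) (by norm_num) (by omega) (by omega)
  rw [if_neg h24]
  by_cases h25 : n ≤ 625
  · rw [if_pos h25]
    exact_mod_cast step n 25 (by norm_num) (by norm_num) (by omega) (by omega)
  rw [if_neg h25]
  by_cases h26 : n ≤ 676
  · rw [if_pos h26]
    exact_mod_cast step n 26 (by norm_num) (by norm_num) (by omega) (by omega)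
  rw [if_neg h26]
  by_cases h27 : n ≤ 729
  · rw [if_pos h27]
    exact_mod_cast step n 27 (by norm_num) (by norm_num) (by omega) (by omega)
  rw [if_neg h27]
  by_cases h28 : n ≤ 784
  · rw [if_pos h28]
    exact_mod_cast step n 28 (by norm_num) (by norm_num) (by omega) (by omega)
  rw [if_neg h28]
  by_cases h29 : n ≤ 841
  · rw [if_pos h29]
    exact_mod_cast step n 29 (by norm_num) (by norm_num) (by omega) (by omega)
  rw [if_neg h29]
  by_cases h30 : n ≤ 900
  · rw [if_pos h30]
    exact_mod_cast step n 30 (by norm_num) (by norm_num) (by omega) (by omega)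
  rw [if_neg h30]
  by_cases h31 : n ≤ 961
  · rw [if_pos h31]
    exact_mod_cast step n 31 (by norm_num) (by norm_num) (by omega) (by omega)
  rw [if_neg h31]
  exact (padB_big n (by omega)).symm

-- ===== VERDICT (by name: the statement is the Claim_ definition above) =====
theorem keyCompletion_spec : Claim_equal_keyCompletion := by
  intro key _
  unfold Spec_keyCompletion
  rw [← String.toList_inj, keyCompletion_toList, alt_toList, pad_eq]
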